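-- pv_equiv track=rewrite | github.com/francoo27/Simulacion | Ruleta.py | getFlujoDeCaja
-- ===== SOURCE A (Python) =====
-- def getFlujoDeCaja(jugadas,apuestaInicial):
--     i = 0
--     j = 0
--     k = 0
--     maxlen = 0
--     caja = []
--     while k < len(jugadas):
--         if len(jugadas[k]) > maxlen:
--             maxlen = len(jugadas[k])
--         k += 1
--     while i < maxlen:
--         j = 0
--         pasoCaja = 0
--         while j < len(jugadas):
--             if(i < len(jugadas[j])):
--                 pasoCaja += apuestaInicial-jugadas[j][i]
--             j += 1
--         caja.append(pasoCaja)
--         i += 1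
--     return caja
-- ===== SOURCE B (Python) =====
-- def getFlujoDeCaja(jugadas, apuestaInicial):
--     # head-peeling transpose: repeatedly sum the live heads, then drop them
--     rows = [r[:] for r in jugadas]
--     caja = []
--     while any(rows):
--         caja.append(sum(apuestaInicial - r[0] for r in rows if r))
--         rows = [r[1:] for r in rows]
--     return caja
-- ===== Notes on version B (the rewrite author's own statement) =====
-- stated objective: alternative
-- what changed: replaces A's max-length computation plus index-based outer-column/inner-row while loops with a head-peeling transpose: while any row is nonempty, sum apuestaInicial minus the live heads and drop them
import Mathlib
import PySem

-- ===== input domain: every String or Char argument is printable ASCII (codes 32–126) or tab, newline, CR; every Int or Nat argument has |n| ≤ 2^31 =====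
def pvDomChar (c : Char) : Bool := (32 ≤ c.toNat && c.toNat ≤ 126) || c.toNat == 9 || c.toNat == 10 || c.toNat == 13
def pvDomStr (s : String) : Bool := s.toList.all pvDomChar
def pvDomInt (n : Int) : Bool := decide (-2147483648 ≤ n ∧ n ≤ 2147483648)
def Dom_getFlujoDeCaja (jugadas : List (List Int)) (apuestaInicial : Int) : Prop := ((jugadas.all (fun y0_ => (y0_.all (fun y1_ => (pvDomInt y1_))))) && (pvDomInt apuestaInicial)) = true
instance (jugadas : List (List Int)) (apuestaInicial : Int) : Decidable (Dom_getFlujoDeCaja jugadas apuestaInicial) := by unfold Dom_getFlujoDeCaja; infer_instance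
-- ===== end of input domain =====

-- B replaces A's index-based column/row loops with a head-peeling transpose; alternative decomposition, same cost.

-- ===== PORT A =====
-- first while loop of A: maxlen scan
def pvMaxlenLoop (jugadas : List (List Int)) (maxlen : Nat) : Nat :=
  jugadas.foldl (fun m r => if r.length > m then r.length else m) maxlen

-- inner while loop of A (over j)
def pvInnerLoop (jugadas : List (List Int)) (apuestaInicial : Int) (i : Nat) : Int :=
  jugadas.foldl (fun s r => if h : i < r.length then s + (apuestaInicial - r[i]) else s) 0

def getFlujoDeCaja (jugadas : List (List Int)) (apuestaInicial : Int) : List Int :=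
  -- outer while loop of A (over i), appending to caja
  (List.range (pvMaxlenLoop jugadas 0)).foldl
    (fun caja i => caja ++ [pvInnerLoop jugadas apuestaInicial i]) []

-- ===== PORT B =====
-- measure used only for termination of pvCols (the max row length)
def pvMax (rows : List (List Int)) : Nat := rows.foldl (fun m r => max m r.length) 0

theorem pvMax_cons (r : List Int) (rs : List (List Int)) :
    pvMax (r :: rs) = max r.length (pvMax rs) := by
  have aux : ∀ (l : List (List Int)) (m : Nat),
      l.foldl (fun m r => max m r.length) m = max m (pvMax l) := by
    intro l
    induction l with
    | nil => intro m; simp [pvMax]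
    | cons x xs ih =>
      intro m
      simp only [pvMax, List.foldl]
      rw [ih, ih]
      omega
  simp only [pvMax, List.foldl]
  rw [aux, aux]
  omega

theorem pvMax_tail (rows : List (List Int)) :
    pvMax (rows.map List.tail) = pvMax rows - 1 := by
  induction rows with
  | nil => simp [pvMax]
  | cons r rs ih =>
    simp only [List.map, pvMax_cons, ih, List.length_tail]
    omega

theorem pvMax_eq_zero (rows : List (List Int)) :
    pvMax rows = 0 ↔ rows.all List.isEmpty = true := by
  induction rows with
  | nil => simp [pvMax]
  | cons r rs ih =>
    simp [pvMax_cons, List.all_cons, ← ih]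

theorem pvMax_tail_lt (rows : List (List Int)) (h : ¬ rows.all List.isEmpty = true) :
    pvMax (rows.map List.tail) < pvMax rows := by
  have h0 : pvMax rows ≠ 0 := fun hz => h ((pvMax_eq_zero rows).mp hz)
  rw [pvMax_tail]
  omega

-- the while loop of B: peel off the live heads of the rows
def pvCols (rows : List (List Int)) : List (List Int) :=
  if _h : rows.all List.isEmpty then []
  else rows.filterMap List.head? :: pvCols (rows.map List.tail)
termination_by pvMax rows
decreasing_by simpa using pvMax_tail_lt rows _h

def pvColSum (apuestaInicial : Int) (col : List Int) : Int :=
  col.foldl (fun s v => s + (apuestaInicial - v)) 0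

def getFlujoDeCaja_alt (jugadas : List (List Int)) (apuestaInicial : Int) : List Int :=
  (pvCols jugadas).map (pvColSum apuestaInicial)

-- ===== PRECONDITION & SPEC =====
def Spec_getFlujoDeCaja (jugadas : List (List Int)) (apuestaInicial : Int) (out : List Int) : Prop := out = getFlujoDeCaja_alt jugadas apuestaInicial
instance (jugadas : List (List Int)) (apuestaInicial : Int) (out : List Int) : Decidable (Spec_getFlujoDeCaja jugadas apuestaInicial out) := by unfold Spec_getFlujoDeCaja; infer_instance

-- ===== CLAIM (what is proved, stated in full; the proofs are below) =====
def Claim_equal_getFlujoDeCaja : Prop := ∀ (jugadas : List (List Int)) (apuestaInicial : Int), Dom_getFlujoDeCaja jugadas apuestaInicial → Spec_getFlujoDeCaja jugadas apuestaInicial (getFlujoDeCaja jugadas apuestaInicial)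

-- ===== LEMMAS AND PROOFS =====

theorem head?_eq_getElem?0 (l : List Int) : l.head? = l[0]? := by
  cases l <;> simp

-- characterisation of B's loop: column i is the list of i-th entries of the rows that have one
theorem pvCols_eq : ∀ (n : Nat) (rows : List (List Int)), pvMax rows = n →
    pvCols rows = (List.range n).map (fun i => rows.filterMap (fun r => r[i]?)) := by
  intro n
  induction n with
  | zero =>
    intro rows h
    rw [pvCols.eq_def]
    simp [(pvMax_eq_zero rows).mp h]
  | succ n ih =>
    intro rows h
    have hne : ¬ rows.all List.isEmpty = true := by
      intro he
      rw [(pvMax_eq_zero rows).mpr he] at h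
      omega
    rw [pvCols.eq_def, dif_neg hne]
    have htl : pvMax (rows.map List.tail) = n := by simp [pvMax_tail, h]
    rw [ih (rows.map List.tail) htl]
    rw [List.range_succ_eq_map]
    simp only [List.map_cons, List.map_map]
    congr 1
    · exact List.filterMap_congr (fun r _ => head?_eq_getElem?0 r)
    · apply List.map_congr_left
      intro i _
      simp [Function.comp]

-- A's maxlen loop computes pvMax
theorem pvMaxlenLoop_eq (rows : List (List Int)) : pvMaxlenLoop rows 0 = pvMax rows := by
  have aux : ∀ (l : List (List Int)) (m : Nat),
      l.foldl (fun m r => if r.length > m then r.length else m) m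
        = l.foldl (fun m r => max m r.length) m := by
    intro l
    induction l with
    | nil => intro m; rfl
    | cons x xs ih =>
      intro m
      simp only [List.foldl]
      rw [ih]
      congr 1
      split <;> omega
  simpa [pvMaxlenLoop, pvMax] using aux rows 0

-- A's append-accumulating outer loop is a map over the range
theorem foldl_append_map {α β : Type} (f : α → β) :
    ∀ (l : List α) (acc : List β),
      l.foldl (fun caja i => caja ++ [f i]) acc = acc ++ l.map f := by
  intro l
  induction l with
  | nil => intro acc; simp
  | cons x xs ih => intro acc; simp [List.foldl, ih]

-- A's inner loop sums apuestaInicial − v over exactly the live entries of column i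
theorem pvInnerLoop_eq (jugadas : List (List Int)) (a : Int) (i : Nat) :
    pvInnerLoop jugadas a i = pvColSum a (jugadas.filterMap (fun r => r[i]?)) := by
  have aux : ∀ (l : List (List Int)) (c : Int),
      l.foldl (fun s r => if h : i < r.length then s + (a - r[i]) else s) c
        = (l.filterMap (fun r => r[i]?)).foldl (fun s v => s + (a - v)) c := by
    intro l
    induction l with
    | nil => intro c; rfl
    | cons r rs ih =>
      intro c
      simp only [List.foldl, List.filterMap_cons]
      by_cases h : i < r.length
      · simp only [h, dif_pos]
        rw [List.getElem?_eq_getElem h]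
        simp [List.foldl, ih]
      · simp only [h, dif_neg, not_false_iff]
        rw [List.getElem?_eq_none (by omega)]
        simp [ih]
  simpa [pvInnerLoop, pvColSum] using aux jugadas 0

-- ===== VERDICT (by name: the statement is the Claim_ definition above) =====
theorem getFlujoDeCaja_spec : Claim_equal_getFlujoDeCaja := by
  intro jugadas a _
  show getFlujoDeCaja jugadas a = getFlujoDeCaja_alt jugadas a
  unfold getFlujoDeCaja getFlujoDeCaja_alt
  rw [foldl_append_map, List.nil_append, pvMaxlenLoop_eq,
      pvCols_eq (pvMax jugadas) jugadas rfl, List.map_map]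
  apply List.map_congr_left
  intro i _
  simp [Function.comp, pvInnerLoop_eq]
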